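-- pv_equiv track=rewrite | github.com/edwinttmm/Testing | ai-model-validation-platform/tests/advanced_feature_test_suite.py | _categorize_technical_issues
-- ===== SOURCE A (Python) =====
-- from typing import Dict, List, Any, Optional
--
-- def _categorize_technical_issues(issues: List[str]) -> Dict[str, int]:
--     """Categorize technical issues by type"""
--     categories = {
--         'connection_issues': 0,
--         'performance_issues': 0,
--         'functionality_issues': 0,
--         'integration_issues': 0,
--         'other_issues': 0
--     }
--
--     for issue in issues:
--         issue_lower = issue.lower()
--         if any(word in issue_lower for word in ['connection', 'websocket', 'network']):
--             categories['connection_issues'] += 1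
--         elif any(word in issue_lower for word in ['slow', 'performance', 'timeout']):
--             categories['performance_issues'] += 1
--         elif any(word in issue_lower for word in ['function', 'feature', 'broken']):
--             categories['functionality_issues'] += 1
--         elif any(word in issue_lower for word in ['integration', 'compatibility']):
--             categories['integration_issues'] += 1
--         else:
--             categories['other_issues'] += 1
--
--     return categories
-- ===== SOURCE B (Python) =====
-- from typing import Dict, List, Any, Optional
--
-- _TABLE = [
--     ('connection_issues', ['connection', 'websocket', 'network']),
--     ('performance_issues', ['slow', 'performance', 'timeout']),
--     ('functionality_issues', ['function', 'feature', 'broken']),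
--     ('integration_issues', ['integration', 'compatibility']),
-- ]
--
-- def _categorize_technical_issues(issues: List[str]) -> Dict[str, int]:
--     """Categorize technical issues by successively sieving the list per category."""
--     remaining = [s.lower() for s in issues]
--     result = {}
--     for name, words in _TABLE:
--         still = [s for s in remaining if not any(w in s for w in words)]
--         result[name] = len(remaining) - len(still)
--         remaining = still
--     result['other_issues'] = len(remaining)
--     return result
-- ===== Notes on version B (the rewrite author's own statement) =====
-- stated objective: alternative
-- what changed: Replaced A's issue-major single pass with if/elif dict increments by a category-major successive sieve: for each category in order, filter the matching issues out of the remaining list and record the length difference as that category's count; the leftover length is other_issues.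
import Mathlib
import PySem

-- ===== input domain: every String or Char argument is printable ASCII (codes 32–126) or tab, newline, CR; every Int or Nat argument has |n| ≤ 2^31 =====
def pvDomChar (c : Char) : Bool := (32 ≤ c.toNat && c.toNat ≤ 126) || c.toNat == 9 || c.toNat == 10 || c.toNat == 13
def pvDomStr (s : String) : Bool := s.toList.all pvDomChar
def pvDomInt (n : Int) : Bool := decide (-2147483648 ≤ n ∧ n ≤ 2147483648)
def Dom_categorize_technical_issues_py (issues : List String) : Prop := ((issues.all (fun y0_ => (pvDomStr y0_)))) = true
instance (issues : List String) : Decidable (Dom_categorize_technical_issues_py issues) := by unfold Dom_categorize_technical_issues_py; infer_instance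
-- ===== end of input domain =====

-- B replaces A's per-issue if/elif counting with a category-major sieve: one pass per
-- category filters the matching issues out and the count is the length difference
-- (alternative decomposition; same asymptotic cost).

-- ===== PORT A =====
-- 'any(word in issue_lower for word in ws)'
def pvAnyIn (ws : List String) (low : List Char) : Bool :=
  ws.any (fun w => PySem.Chars.isIn w.toList low)

def categorize_technical_issues_py (issues : List String) : List (String × Int) :=
  let categories : PySem.Dict String Int := PySem.Dict.ofList
    [("connection_issues", 0), ("performance_issues", 0), ("functionality_issues", 0),
     ("integration_issues", 0), ("other_issues", 0)]
  let final := issues.foldl (fun cats issue =>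
    let low := PySem.Chars.lower issue.toList
    if pvAnyIn ["connection", "websocket", "network"] low then
      cats.modify "connection_issues" 0 (· + 1)
    else if pvAnyIn ["slow", "performance", "timeout"] low then
      cats.modify "performance_issues" 0 (· + 1)
    else if pvAnyIn ["function", "feature", "broken"] low then
      cats.modify "functionality_issues" 0 (· + 1)
    else if pvAnyIn ["integration", "compatibility"] low then
      cats.modify "integration_issues" 0 (· + 1)
    else
      cats.modify "other_issues" 0 (· + 1)) categories
  final.items

-- ===== PORT B =====
def pvTable : List (String × List String) :=
  [("connection_issues", ["connection", "websocket", "network"]),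
   ("performance_issues", ["slow", "performance", "timeout"]),
   ("functionality_issues", ["function", "feature", "broken"]),
   ("integration_issues", ["integration", "compatibility"])]

-- successive sieve over the lowered issues: per category, drop the matches and record the
-- length difference as that category's count; the leftover length is 'other_issues'
def categorize_technical_issues_py_alt (issues : List String) : List (String × Int) :=
  let remaining0 := issues.map (fun s => PySem.Chars.lower s.toList)
  let st := pvTable.foldl
    (fun (st : List (List Char) × PySem.Dict String Int) row =>
      let still := st.1.filter (fun s => !(row.2.any (fun w => PySem.Chars.isIn w.toList s)))
      (still, st.2.insert row.1 ((st.1.length : Int) - (still.length : Int))))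
    (remaining0, PySem.Dict.mk [])
  (st.2.insert "other_issues" ((st.1.length : Int))).items

-- ===== PRECONDITION & SPEC =====
def Spec_categorize_technical_issues_py (issues : List String) (out : List (String × Int)) : Prop := out = categorize_technical_issues_py_alt issues
instance (issues : List String) (out : List (String × Int)) : Decidable (Spec_categorize_technical_issues_py issues out) := by unfold Spec_categorize_technical_issues_py; infer_instance

-- ===== CLAIM =====
def Claim_equal_categorize_technical_issues_py : Prop := ∀ (issues : List String), Dom_categorize_technical_issues_py issues → Spec_categorize_technical_issues_py issues (categorize_technical_issues_py issues)

-- ===== LEMMAS AND PROOFS =====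

-- predicates on an already-lowered issue
def pvQ1 (s : List Char) : Bool := pvAnyIn ["connection", "websocket", "network"] s
def pvQ2 (s : List Char) : Bool := pvAnyIn ["slow", "performance", "timeout"] s
def pvQ3 (s : List Char) : Bool := pvAnyIn ["function", "feature", "broken"] s
def pvQ4 (s : List Char) : Bool := pvAnyIn ["integration", "compatibility"] s

-- sieve count = length difference after filtering the matches out
theorem sieve_step {α : Type} (l : List α) (p : α → Bool) :
    (l.length : Int) - ((l.filter (fun a => !p a)).length : Int) = (l.countP p : Int) := by
  have h1 : (l.filter (fun a => !p a)).length = l.countP (fun a => !p a) :=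
    List.countP_eq_length_filter.symm
  have h2 : l.length = l.countP p + l.countP (fun a => !p a) := by
    have := List.length_eq_countP_add_countP p (l := l)
    simpa using this
  omega

-- A's fold over a generic 5-entry dict adds, per entry, the number of lowered issues that
-- first match that category's predicate
theorem pv_fold_invariant (issues : List String) (a b c d e : Int) :
    issues.foldl (fun cats issue =>
      let low := PySem.Chars.lower issue.toList
      if pvAnyIn ["connection", "websocket", "network"] low then
        cats.modify "connection_issues" 0 (· + 1)
      else if pvAnyIn ["slow", "performance", "timeout"] low then
        cats.modify "performance_issues" 0 (· + 1)
      else if pvAnyIn ["function", "feature", "broken"] low then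
        cats.modify "functionality_issues" 0 (· + 1)
      else if pvAnyIn ["integration", "compatibility"] low then
        cats.modify "integration_issues" 0 (· + 1)
      else
        cats.modify "other_issues" 0 (· + 1))
      (PySem.Dict.mk [("connection_issues", a), ("performance_issues", b),
        ("functionality_issues", c), ("integration_issues", d), ("other_issues", e)])
    = PySem.Dict.mk
        [("connection_issues", a + (((issues.map (fun s => PySem.Chars.lower s.toList)).countP pvQ1 : Nat) : Int)),
         ("performance_issues", b + (((issues.map (fun s => PySem.Chars.lower s.toList)).countP (fun s => pvQ2 s && !pvQ1 s) : Nat) : Int)),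
         ("functionality_issues", c + (((issues.map (fun s => PySem.Chars.lower s.toList)).countP (fun s => (pvQ3 s && !pvQ2 s) && !pvQ1 s) : Nat) : Int)),
         ("integration_issues", d + (((issues.map (fun s => PySem.Chars.lower s.toList)).countP (fun s => ((pvQ4 s && !pvQ3 s) && !pvQ2 s) && !pvQ1 s) : Nat) : Int)),
         ("other_issues", e + (((issues.map (fun s => PySem.Chars.lower s.toList)).countP (fun s => ((!pvQ4 s && !pvQ3 s) && !pvQ2 s) && !pvQ1 s) : Nat) : Int))] := by
  induction issues generalizing a b c d e with
  | nil => simp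
  | cons x xs ih =>
    simp only [List.foldl_cons, List.map_cons, List.countP_cons]
    by_cases h1 : pvQ1 (PySem.Chars.lower x.toList)
    · rw [show pvAnyIn ["connection", "websocket", "network"] (PySem.Chars.lower x.toList) = true from h1]
      simp only [if_true]
      rw [show (PySem.Dict.mk [("connection_issues", a), ("performance_issues", b), ("functionality_issues", c), ("integration_issues", d), ("other_issues", e)]).modify
        "connection_issues" 0 (· + 1) = PySem.Dict.mk [("connection_issues", a + 1), ("performance_issues", b), ("functionality_issues", c), ("integration_issues", d), ("other_issues", e)] from by
          simp [PySem.Dict.modify, PySem.Dict.getD, PySem.Dict.get?, PySem.Dict.insert]]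
      rw [ih]
      simp [h1]
      omega
    · by_cases h2 : pvQ2 (PySem.Chars.lower x.toList)
      · rw [show pvAnyIn ["connection", "websocket", "network"] (PySem.Chars.lower x.toList) = false from by simpa [pvQ1] using h1,
            show pvAnyIn ["slow", "performance", "timeout"] (PySem.Chars.lower x.toList) = true from h2]
        simp only [Bool.false_eq_true, if_false, if_true]
        rw [show (PySem.Dict.mk [("connection_issues", a), ("performance_issues", b), ("functionality_issues", c), ("integration_issues", d), ("other_issues", e)]).modify
          "performance_issues" 0 (· + 1) = PySem.Dict.mk [("connection_issues", a), ("performance_issues", b + 1), ("functionality_issues", c), ("integration_issues", d), ("other_issues", e)] from by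
            simp [PySem.Dict.modify, PySem.Dict.getD, PySem.Dict.get?, PySem.Dict.insert]]
        rw [ih]
        simp [h1, h2]
        omega
      · by_cases h3 : pvQ3 (PySem.Chars.lower x.toList)
        · rw [show pvAnyIn ["connection", "websocket", "network"] (PySem.Chars.lower x.toList) = false from by simpa [pvQ1] using h1,
              show pvAnyIn ["slow", "performance", "timeout"] (PySem.Chars.lower x.toList) = false from by simpa [pvQ2] using h2,
              show pvAnyIn ["function", "feature", "broken"] (PySem.Chars.lower x.toList) = true from h3]
          simp only [Bool.false_eq_true, if_false, if_true]
          rw [show (PySem.Dict.mk [("connection_issues", a), ("performance_issues", b), ("functionality_issues", c), ("integration_issues", d), ("other_issues", e)]).modify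
            "functionality_issues" 0 (· + 1) = PySem.Dict.mk [("connection_issues", a), ("performance_issues", b), ("functionality_issues", c + 1), ("integration_issues", d), ("other_issues", e)] from by
              simp [PySem.Dict.modify, PySem.Dict.getD, PySem.Dict.get?, PySem.Dict.insert]]
          rw [ih]
          simp [h1, h2, h3]
          omega
        · by_cases h4 : pvQ4 (PySem.Chars.lower x.toList)
          · rw [show pvAnyIn ["connection", "websocket", "network"] (PySem.Chars.lower x.toList) = false from by simpa [pvQ1] using h1,
                show pvAnyIn ["slow", "performance", "timeout"] (PySem.Chars.lower x.toList) = false from by simpa [pvQ2] using h2,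
                show pvAnyIn ["function", "feature", "broken"] (PySem.Chars.lower x.toList) = false from by simpa [pvQ3] using h3,
                show pvAnyIn ["integration", "compatibility"] (PySem.Chars.lower x.toList) = true from h4]
            simp only [Bool.false_eq_true, if_false, if_true]
            rw [show (PySem.Dict.mk [("connection_issues", a), ("performance_issues", b), ("functionality_issues", c), ("integration_issues", d), ("other_issues", e)]).modify
              "integration_issues" 0 (· + 1) = PySem.Dict.mk [("connection_issues", a), ("performance_issues", b), ("functionality_issues", c), ("integration_issues", d + 1), ("other_issues", e)] from by
                simp [PySem.Dict.modify, PySem.Dict.getD, PySem.Dict.get?, PySem.Dict.insert]]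
            rw [ih]
            simp [h1, h2, h3, h4]
            omega
          · rw [show pvAnyIn ["connection", "websocket", "network"] (PySem.Chars.lower x.toList) = false from by simpa [pvQ1] using h1,
                show pvAnyIn ["slow", "performance", "timeout"] (PySem.Chars.lower x.toList) = false from by simpa [pvQ2] using h2,
                show pvAnyIn ["function", "feature", "broken"] (PySem.Chars.lower x.toList) = false from by simpa [pvQ3] using h3,
                show pvAnyIn ["integration", "compatibility"] (PySem.Chars.lower x.toList) = false from by simpa [pvQ4] using h4]
            simp only [Bool.false_eq_true, if_false]
            rw [show (PySem.Dict.mk [("connection_issues", a), ("performance_issues", b), ("functionality_issues", c), ("integration_issues", d), ("other_issues", e)]).modify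
              "other_issues" 0 (· + 1) = PySem.Dict.mk [("connection_issues", a), ("performance_issues", b), ("functionality_issues", c), ("integration_issues", d), ("other_issues", e + 1)] from by
                simp [PySem.Dict.modify, PySem.Dict.getD, PySem.Dict.get?, PySem.Dict.insert]]
            rw [ih]
            simp [h1, h2, h3, h4]
            omega

-- ===== VERDICT =====

theorem alt_closed (issues : List String) :
    categorize_technical_issues_py_alt issues =
      (let L0 := issues.map (fun s => PySem.Chars.lower s.toList);
       let F1 := L0.filter (fun s => !pvQ1 s);
       let F2 := F1.filter (fun s => !pvQ2 s);
       let F3 := F2.filter (fun s => !pvQ3 s);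
       let F4 := F3.filter (fun s => !pvQ4 s);
       [("connection_issues", (L0.length : Int) - (F1.length : Int)),
        ("performance_issues", (F1.length : Int) - (F2.length : Int)),
        ("functionality_issues", (F2.length : Int) - (F3.length : Int)),
        ("integration_issues", (F3.length : Int) - (F4.length : Int)),
        ("other_issues", (F4.length : Int))]) := rfl

-- ===== VERDICT =====
theorem categorize_technical_issues_py_spec : Claim_equal_categorize_technical_issues_py := by
  intro issues _
  show categorize_technical_issues_py issues = categorize_technical_issues_py_alt issues
  have hA : categorize_technical_issues_py issues =
      (issues.foldl (fun cats issue =>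
        let low := PySem.Chars.lower issue.toList
        if pvAnyIn ["connection", "websocket", "network"] low then
          cats.modify "connection_issues" 0 (· + 1)
        else if pvAnyIn ["slow", "performance", "timeout"] low then
          cats.modify "performance_issues" 0 (· + 1)
        else if pvAnyIn ["function", "feature", "broken"] low then
          cats.modify "functionality_issues" 0 (· + 1)
        else if pvAnyIn ["integration", "compatibility"] low then
          cats.modify "integration_issues" 0 (· + 1)
        else
          cats.modify "other_issues" 0 (· + 1))
        (PySem.Dict.mk [("connection_issues", 0), ("performance_issues", 0),
          ("functionality_issues", 0), ("integration_issues", 0), ("other_issues", 0)])).items := rfl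
  rw [hA, pv_fold_invariant, alt_closed]
  have s1 := sieve_step (issues.map (fun s => PySem.Chars.lower s.toList)) pvQ1
  have s2 := sieve_step ((issues.map (fun s => PySem.Chars.lower s.toList)).filter (fun s => !pvQ1 s)) pvQ2
  have s3 := sieve_step (((issues.map (fun s => PySem.Chars.lower s.toList)).filter (fun s => !pvQ1 s)).filter (fun s => !pvQ2 s)) pvQ3
  have s4 := sieve_step ((((issues.map (fun s => PySem.Chars.lower s.toList)).filter (fun s => !pvQ1 s)).filter (fun s => !pvQ2 s)).filter (fun s => !pvQ3 s)) pvQ4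
  simp only [List.countP_filter, List.countP_map] at s1 s2 s3 s4
  have s5 : (((((issues.map (fun s => PySem.Chars.lower s.toList)).filter (fun s => !pvQ1 s)).filter (fun s => !pvQ2 s)).filter (fun s => !pvQ3 s)).filter (fun s => !pvQ4 s)).length
      = (issues.map (fun s => PySem.Chars.lower s.toList)).countP (fun s => ((!pvQ4 s && !pvQ3 s) && !pvQ2 s) && !pvQ1 s) := by
    simp only [← List.countP_eq_length_filter, List.countP_filter, List.countP_map]
  simp only [List.filter_filter, List.length_map, List.countP_map] at s1 s2 s3 s4 s5
  simp only [List.cons.injEq, Prod.mk.injEq, zero_add, and_true, true_and,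
    List.countP_map, List.filter_filter, List.length_map]
  refine ⟨?_, ?_, ?_, ?_, ?_⟩ <;> omega
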